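-- pv_equiv track=rewrite | github.com/eduardferre/BuildingAI_Course | exercise7_flipcoin.py | count
-- ===== SOURCE A (Python) =====
-- def count(seq):
--     # insert code to return the number of occurrences of 11111 in the sequence
--
--     i = 0
--     count = 0
--
--     while i < len(seq):
--         if i > 3 and seq[i] == 1 and seq[i-1] == 1 and seq[i-2] == 1 and seq[i-3] == 1 and seq[i-4] == 1:
--             count += 1
--         i += 1
--
--     return count
-- ===== SOURCE B (Python) =====
-- def count(seq):
--     result = 0
--     run = 0
--     for i in range(len(seq)):
--         if seq[i] == 1:
--             run += 1
--         else:
--             run = 0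
--         if run >= 5:
--             result += 1
--     return result
-- ===== Notes on version B (the rewrite author's own statement) =====
-- stated objective: simpler
-- what changed: B replaces A's fixed 5-wide window re-test at every index with a single pass that maintains a running length of consecutive 1s and counts whenever it reaches 5.
import Mathlib
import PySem

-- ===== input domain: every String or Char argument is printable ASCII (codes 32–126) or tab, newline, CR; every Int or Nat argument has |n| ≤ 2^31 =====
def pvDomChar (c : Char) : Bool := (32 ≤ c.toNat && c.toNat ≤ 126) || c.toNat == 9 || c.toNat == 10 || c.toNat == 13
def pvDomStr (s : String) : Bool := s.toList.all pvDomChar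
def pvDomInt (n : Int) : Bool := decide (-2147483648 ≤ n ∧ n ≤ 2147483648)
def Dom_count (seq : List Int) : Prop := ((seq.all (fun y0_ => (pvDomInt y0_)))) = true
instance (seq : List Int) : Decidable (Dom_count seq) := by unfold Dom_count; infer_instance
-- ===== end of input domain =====

-- B replaces A's 5-wide window re-test at every index with a single pass tracking the running length of consecutive 1s (simpler decomposition).

-- ===== PORT A =====
-- while i < len(seq): if i > 3 and all five window entries == 1: count += 1
def count (seq : List Int) : Int :=
  (List.range seq.length).foldl
    (fun (c : Int) (i : Nat) =>
      if 3 < i ∧ PySem.List.pyGetD seq (i : Int) 0 = 1 ∧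
          PySem.List.pyGetD seq ((i : Int) - 1) 0 = 1 ∧
          PySem.List.pyGetD seq ((i : Int) - 2) 0 = 1 ∧
          PySem.List.pyGetD seq ((i : Int) - 3) 0 = 1 ∧
          PySem.List.pyGetD seq ((i : Int) - 4) 0 = 1
      then c + 1 else c) 0

-- ===== PORT B =====
-- for i in range(len(seq)): update run; if run >= 5: result += 1
def count_alt (seq : List Int) : Int :=
  (
    (List.range seq.length).foldl
      (fun (st : Int × Int) (i : Nat) =>
        let run := if PySem.List.pyGetD seq (i : Int) 0 = 1 then st.2 + 1 else 0
        (if 5 ≤ run then st.1 + 1 else st.1, run)) (0, 0)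
  ).1

-- ===== PRECONDITION & SPEC =====
def Spec_count (seq : List Int) (out : Int) : Prop := out = count_alt seq
instance (seq : List Int) (out : Int) : Decidable (Spec_count seq out) := by unfold Spec_count; infer_instance

-- ===== CLAIM (what is proved, stated in full; the proofs are below) =====
def Claim_equal_count : Prop := ∀ (seq : List Int), Dom_count seq → Spec_count seq (count seq)

-- ===== LEMMAS AND PROOFS =====

-- trailing-ones length of the first j elements
def trail (seq : List Int) : Nat → Int
  | 0 => 0
  | j + 1 => if seq.getD j 0 = 1 then trail seq j + 1 else 0

theorem trail_nonneg (seq : List Int) (j : Nat) : 0 ≤ trail seq j := by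
  induction j with
  | zero => simp [trail]
  | succ j ih => simp only [trail]; split_ifs <;> omega

theorem trail_le (seq : List Int) (j : Nat) : trail seq j ≤ (j : Int) := by
  induction j with
  | zero => simp [trail]
  | succ j ih => simp only [trail]; split_ifs <;> push_cast <;> omega

-- the window condition A tests at index i holds iff the running length after step i reaches 5
theorem cond_iff (seq : List Int) (i : Nat) :
    ((3 < i ∧ PySem.List.pyGetD seq (i : Int) 0 = 1 ∧
        PySem.List.pyGetD seq ((i : Int) - 1) 0 = 1 ∧
        PySem.List.pyGetD seq ((i : Int) - 2) 0 = 1 ∧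
        PySem.List.pyGetD seq ((i : Int) - 3) 0 = 1 ∧
        PySem.List.pyGetD seq ((i : Int) - 4) 0 = 1) ↔ 5 ≤ trail seq (i + 1)) := by
  by_cases h3 : 3 < i
  · obtain ⟨m, rfl⟩ : ∃ m, i = m + 4 := ⟨i - 4, by omega⟩
    have e1 : ((m + 4 : Nat) : Int) - 1 = ((m + 3 : Nat) : Int) := by push_cast; ring
    have e2 : ((m + 4 : Nat) : Int) - 2 = ((m + 2 : Nat) : Int) := by push_cast; ring
    have e3 : ((m + 4 : Nat) : Int) - 3 = ((m + 1 : Nat) : Int) := by push_cast; ring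
    have e4 : ((m + 4 : Nat) : Int) - 4 = ((m : Nat) : Int) := by push_cast; ring
    rw [e1, e2, e3, e4]
    simp only [PySem.List.pyGetD_natCast]
    have hn := trail_nonneg seq m
    show (3 < m + 4 ∧ _) ↔ _
    simp only [trail]
    constructor
    · rintro ⟨-, h0, h1, h2, h3, h4⟩
      rw [if_pos h0, if_pos h1, if_pos h2, if_pos h3, if_pos h4]; omega
    · intro h
      split_ifs at h with a b c d e
      · exact ⟨by omega, a, b, c, d, e⟩
      all_goals omega
  · have := trail_le seq (i + 1)
    constructor
    · rintro ⟨h, -⟩; exact absurd h h3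
    · intro h; exfalso; have : (i : Int) + 1 ≤ 4 := by omega
      omega

-- joint loop invariant: A's accumulator equals B's result component, and B's run equals trail
theorem loop_eq (seq : List Int) (n : Nat) :
    (List.range n).foldl
      (fun (c : Int) (i : Nat) =>
        if 3 < i ∧ PySem.List.pyGetD seq (i : Int) 0 = 1 ∧
            PySem.List.pyGetD seq ((i : Int) - 1) 0 = 1 ∧
            PySem.List.pyGetD seq ((i : Int) - 2) 0 = 1 ∧
            PySem.List.pyGetD seq ((i : Int) - 3) 0 = 1 ∧
            PySem.List.pyGetD seq ((i : Int) - 4) 0 = 1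
        then c + 1 else c) 0
    = ((List.range n).foldl
        (fun (st : Int × Int) (i : Nat) =>
          let run := if PySem.List.pyGetD seq (i : Int) 0 = 1 then st.2 + 1 else 0
          (if 5 ≤ run then st.1 + 1 else st.1, run)) (0, 0)).1
    ∧ ((List.range n).foldl
        (fun (st : Int × Int) (i : Nat) =>
          let run := if PySem.List.pyGetD seq (i : Int) 0 = 1 then st.2 + 1 else 0
          (if 5 ≤ run then st.1 + 1 else st.1, run)) (0, 0)).2 = trail seq n := by
  induction n with
  | zero => simp [trail]
  | succ n ih =>
    obtain ⟨ih1, ih2⟩ := ih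
    rw [List.range_succ, List.foldl_append, List.foldl_append]
    simp only [List.foldl_cons, List.foldl_nil]
    have hrun : (if PySem.List.pyGetD seq (n : Int) 0 = 1 then
        ((List.range n).foldl
          (fun (st : Int × Int) (i : Nat) =>
            let run := if PySem.List.pyGetD seq (i : Int) 0 = 1 then st.2 + 1 else 0
            (if 5 ≤ run then st.1 + 1 else st.1, run)) (0, 0)).2 + 1 else 0) = trail seq (n + 1) := by
      rw [ih2]
      simp only [trail, PySem.List.pyGetD_natCast]
    constructor
    · simp only [hrun]
      rw [ih1]
      by_cases hc : 5 ≤ trail seq (n + 1)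
      · rw [if_pos ((cond_iff seq n).mpr hc), if_pos hc]
      · rw [if_neg (fun h => hc ((cond_iff seq n).mp h)), if_neg hc]
    · simp only [hrun]

-- ===== VERDICT (by name: the statement is the Claim_ definition above) =====
theorem count_spec : Claim_equal_count := by
  intro seq _
  show count seq = count_alt seq
  simpa only [count, count_alt] using (loop_eq seq seq.length).1
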